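-- pv_equiv track=rewrite | github.com/m0hammadb/CodeWarsChallenges | nico_encoding_decoding.py | getNumKey
-- ===== SOURCE A (Python) =====
-- def getNumKey(key):
--     sortedKey = list(key)
--     sortedKey.sort()
--     finalResult = ""
--     for s in key:
--         finalResult += str(sortedKey.index(s)) + ","
--
--     rValue = [int(x) for x in finalResult[:-1].split(",")]
--     return rValue
-- ===== SOURCE B (Python) =====
-- def getNumKey(key):
--     # rank-by-comparison: a char's first index in the sorted key equals the
--     # number of strictly smaller chars; no sort, no .index, no string building
--     return [sum(1 for d in key if d < c) for c in key]
-- ===== Notes on version B (the rewrite author's own statement) =====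
-- stated objective: simpler
-- what changed: A sorts the whole string, scans it with sortedKey.index per character, and round-trips the answers through a comma-separated string it re-parses with int(); B never sorts or builds strings: it uses the identity first-index-in-sorted = number of strictly smaller elements and directly counts, for each character, how many characters of the key compare below it.
-- outside the precondition, e.g. on getNumKey(''): A raises ValueError, B returns []
import Mathlib
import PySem

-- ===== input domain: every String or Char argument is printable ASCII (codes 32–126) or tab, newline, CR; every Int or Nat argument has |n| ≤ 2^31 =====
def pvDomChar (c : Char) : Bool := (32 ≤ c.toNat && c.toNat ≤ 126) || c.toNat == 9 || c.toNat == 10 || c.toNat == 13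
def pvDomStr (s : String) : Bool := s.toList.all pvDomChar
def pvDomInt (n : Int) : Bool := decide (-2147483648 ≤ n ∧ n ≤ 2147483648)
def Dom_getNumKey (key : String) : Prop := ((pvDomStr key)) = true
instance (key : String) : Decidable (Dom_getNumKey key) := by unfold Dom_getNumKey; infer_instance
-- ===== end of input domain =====

-- B drops A's sort / .index scans / comma-string round trip and instead counts, for each
-- character, the strictly smaller characters of the key (objective: simpler).

-- ===== PORT A =====
-- int(x) ported by hand (PySem's parser is used through a private helper we cannot reason about):
-- exact on nonempty pure-digit strings — the only strings int() ever receives inside Pre_, since each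
-- x is str(i) for a list index i ≥ 0; the `none` (= ValueError) branch is only reached for key = "".
def pyIntDigits? (cs : List Char) : Option Int :=
  if cs ≠ [] ∧ cs.all Char.isDigit then
    some (cs.foldl (fun a c => a * 10 + ((c.toNat : Int) - 48)) 0)
  else none

def getNumKey (key : String) : List Int :=
  let sortedKey := PySem.List.sorted key.toList (fun x => x) false
  -- finalResult += str(sortedKey.index(s)) + ","   (.index never raises here: s ∈ sortedKey; getD 0 is the
  -- ValueError placeholder, never used)
  let finalResult : List Char := key.toList.foldl
    (fun acc s =>
      acc ++ PySem.Int.toChars (((PySem.List.index? sortedKey s).getD 0 : Nat) : Int) ++ [',']) []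
  -- [int(x) for x in finalResult[:-1].split(",")]  (getD 0 stands for int()'s ValueError, reached only at key = "")
  (PySem.Chars.splitOn (PySem.List.slice finalResult none (some (-1))) [',']).map
    (fun x => (pyIntDigits? x).getD 0)

-- ===== PORT B =====
def getNumKey_alt (key : String) : List Int :=
  key.toList.map (fun c => key.toList.foldl (fun a d => if d < c then a + 1 else a) (0 : Int))

-- ===== PRECONDITION & SPEC =====
-- Pre_ excludes only the empty string, on which A raises ValueError.
def Pre_getNumKey (key : String) : Prop := key ≠ ""
instance (key : String) : Decidable (Pre_getNumKey key) := by unfold Pre_getNumKey; infer_instance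
def pvWitness_getNumKey : String := "banana"

def Spec_getNumKey (key : String) (out : List Int) : Prop := out = getNumKey_alt key
instance (key : String) (out : List Int) : Decidable (Spec_getNumKey key out) := by
  unfold Spec_getNumKey; infer_instance

-- ===== CLAIM (what is proved, stated in full; the proofs are below) =====
def Claim_equal_getNumKey : Prop :=
  ∀ (key : String), Dom_getNumKey key → Pre_getNumKey key → Spec_getNumKey key (getNumKey key)

-- ===== LEMMAS AND PROOFS =====

-- a structural model of "...".split(",")
def splitC : List Char → List (List Char)
  | [] => [[]]
  | c :: rest => if c = ',' then [] :: splitC rest else (splitC rest).modifyHead (c :: ·)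

theorem splitC_ne_nil (l : List Char) : splitC l ≠ [] := by
  induction l with
  | nil => simp [splitC]
  | cons c rest ih =>
    simp only [splitC]
    split_ifs
    · simp
    · cases h : splitC rest with
      | nil => exact absurd h ih
      | cons a t => simp

theorem go_spec (fuel : Nat) (l cur : List Char) (acc : List (List Char))
    (h : l.length ≤ fuel) :
    PySem.Chars.splitOn.go [','] fuel l cur acc
      = acc.reverse ++ (splitC l).modifyHead (cur.reverse ++ ·) := by
  induction fuel generalizing l cur acc with
  | zero =>
    have hl : l = [] := by simpa using h
    subst hl
    unfold PySem.Chars.splitOn.go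
    simp [splitC]
  | succ f ih =>
    cases l with
    | nil =>
      unfold PySem.Chars.splitOn.go
      simp [splitC]
    | cons c rest =>
      by_cases hc : c = ','
      · subst hc
        unfold PySem.Chars.splitOn.go
        rw [if_pos (by simp [List.isPrefixOf])]
        simp only [List.length_cons, List.length_nil, List.drop_succ_cons, List.drop_zero]
        rw [ih rest [] (cur.reverse :: acc) (by simpa using Nat.le_of_succ_le_succ h)]
        simp only [splitC, List.reverse_cons, List.append_assoc,
          List.singleton_append, List.reverse_nil, List.nil_append]
        cases h2 : splitC rest with
        | nil => exact absurd h2 (splitC_ne_nil rest)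
        | cons a t => simp
      · unfold PySem.Chars.splitOn.go
        have hpf : [','].isPrefixOf (c :: rest) = false := by
          simp only [List.isPrefixOf, Bool.and_eq_false_iff, beq_eq_false_iff_ne, ne_eq]
          exact Or.inl fun hh => hc hh.symm
        rw [if_neg (by simp [hpf])]
        rw [ih rest (c :: cur) acc (by simpa using Nat.le_of_succ_le_succ h)]
        simp only [splitC, if_neg hc]
        cases h2 : splitC rest with
        | nil => exact absurd h2 (splitC_ne_nil rest)
        | cons a t => simp

theorem splitOn_eq_splitC (l : List Char) : PySem.Chars.splitOn l [','] = splitC l := by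
  unfold PySem.Chars.splitOn
  rw [go_spec (l.length + 1) l [] [] (by omega)]
  cases h : splitC l with
  | nil => exact absurd h (splitC_ne_nil l)
  | cons a t => simp

theorem splitC_no_comma (t : List Char) (h : ',' ∉ t) : splitC t = [t] := by
  induction t with
  | nil => rfl
  | cons c rest ih =>
    simp only [List.mem_cons, not_or] at h
    simp only [splitC]
    rw [if_neg (fun hh => h.1 hh.symm), ih h.2]
    rfl

theorem splitC_append_comma (t r : List Char) (h : ',' ∉ t) :
    splitC (t ++ ',' :: r) = t :: splitC r := by
  induction t with
  | nil => simp [splitC]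
  | cons c rest ih =>
    simp only [List.mem_cons, not_or] at h
    simp only [List.cons_append, splitC]
    rw [if_neg (fun hh => h.1 hh.symm), ih h.2]
    rfl

theorem splitC_joined (ts : List (List Char)) (h : ts ≠ [])
    (hc : ∀ t ∈ ts, ',' ∉ t) :
    splitC ((ts.flatMap (fun t => t ++ [','])).dropLast) = ts := by
  induction ts with
  | nil => exact absurd rfl h
  | cons t ts ih =>
    cases ts with
    | nil =>
      simp only [List.flatMap_cons, List.flatMap_nil, List.append_nil]
      rw [List.dropLast_concat]
      exact splitC_no_comma t (hc t (by simp))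
    | cons u us =>
      have hrest : ((u :: us).flatMap (fun t => t ++ [','])) ≠ [] := by simp
      rw [List.flatMap_cons]
      rw [List.dropLast_append_of_ne_nil hrest]
      have : t ++ [','] ++ ((u :: us).flatMap (fun t => t ++ [','])).dropLast
          = t ++ ',' :: ((u :: us).flatMap (fun t => t ++ [','])).dropLast := by simp
      rw [this, splitC_append_comma _ _ (hc t (by simp)),
        ih (by simp) (fun x hx => hc x (by simp [hx]))]

-- str(n) / int(s) round trip on naturals
theorem digitChar_isDigit {m : Nat} (h : m < 10) : (Nat.digitChar m).isDigit = true := by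
  interval_cases m <;> decide

theorem digitChar_val {m : Nat} (h : m < 10) : ((Nat.digitChar m).toNat : Int) - 48 = m := by
  interval_cases m <;> decide

theorem toDigits_all_digits (n : Nat) : ∀ c ∈ Nat.toDigits 10 n, c.isDigit = true := by
  induction n using Nat.strong_induction_on with
  | _ n ih =>
    rw [Nat.toDigits_eq_if (by norm_num)]
    split_ifs with h
    · intro c hcm
      simp only [List.mem_singleton] at hcm
      subst hcm; exact digitChar_isDigit h
    · intro c hcm
      rcases List.mem_append.mp hcm with h1 | h2
      · exact ih (n / 10) (Nat.div_lt_self (by omega) (by omega)) c h1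
      · simp only [List.mem_singleton] at h2
        subst h2; exact digitChar_isDigit (Nat.mod_lt n (by omega))

theorem toDigits_ne_nil (n : Nat) : Nat.toDigits 10 n ≠ [] := by
  rw [Nat.toDigits_eq_if (by norm_num)]
  split_ifs <;> simp

theorem foldl_toDigits (n : Nat) :
    (Nat.toDigits 10 n).foldl (fun a c => a * 10 + ((c.toNat : Int) - 48)) 0 = n := by
  induction n using Nat.strong_induction_on with
  | _ n ih =>
    rw [Nat.toDigits_eq_if (by norm_num)]
    split_ifs with h
    · simp [digitChar_val h]
    · rw [List.foldl_append, ih (n / 10) (Nat.div_lt_self (by omega) (by omega))]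
      simp only [List.foldl_cons, List.foldl_nil]
      rw [digitChar_val (Nat.mod_lt n (by omega))]
      push_cast
      omega

theorem toChars_natCast (n : Nat) : PySem.Int.toChars (n : Int) = Nat.toDigits 10 n := by
  unfold PySem.Int.toChars
  rw [if_neg (by omega)]
  simp

theorem pyIntDigits_toChars (n : Nat) :
    pyIntDigits? (PySem.Int.toChars (n : Int)) = some (n : Int) := by
  rw [toChars_natCast]
  unfold pyIntDigits?
  rw [if_pos ⟨toDigits_ne_nil n, by
    rw [List.all_eq_true]; exact fun c hcm => toDigits_all_digits n c hcm⟩]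
  rw [foldl_toDigits]

theorem comma_not_mem_toChars (n : Nat) : ',' ∉ PySem.Int.toChars (n : Int) := by
  rw [toChars_natCast]
  intro hm
  have := toDigits_all_digits n ',' hm
  simp [Char.isDigit] at this

-- first index in a sorted list = number of strictly smaller elements
theorem index?_sorted_eq_countP (s : List Char) (c : Char)
    (hp : s.Pairwise (fun a b => a ≤ b)) (hm : c ∈ s) :
    PySem.List.index? s c = some (s.countP (fun d => decide (d < c))) := by
  induction s with
  | nil => cases hm
  | cons x s ih =>
    rcases List.pairwise_cons.mp hp with ⟨hx, hp'⟩
    by_cases hxc : x = c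
    · subst hxc
      rw [PySem.List.index?_cons_self]
      have hz : s.countP (fun d => decide (d < x)) = 0 := by
        rw [List.countP_eq_zero]
        intro d hd
        simpa using not_lt.mpr (hx d hd)
      simp [hz]
    · have hcs : c ∈ s := by
        rcases List.mem_cons.mp hm with h1 | h1
        · exact absurd h1.symm hxc
        · exact h1
      rw [PySem.List.index?_cons_of_ne _ hxc, ih hp' hcs]
      have hxltc : x < c := lt_of_le_of_ne (hx c hcs) hxc
      simp [hxltc]

-- A computes the count of strictly smaller characters, per character
theorem getNumKey_eq_countP (key : String) (h : key.toList ≠ []) :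
    getNumKey key
      = key.toList.map (fun c => ((key.toList.countP (fun d => decide (d < c)) : Nat) : Int)) := by
  simp only [getNumKey]
  have hpw := PySem.List.sorted_pairwise key.toList (fun x => x)
  have hperm := PySem.List.sorted_perm key.toList (fun x => x) false
  have hidx : ∀ c ∈ key.toList,
      ((PySem.List.index? (PySem.List.sorted key.toList (fun x => x) false) c).getD 0 : Nat)
        = key.toList.countP (fun d => decide (d < c)) := by
    intro c hc
    rw [index?_sorted_eq_countP _ c hpw ((PySem.List.mem_sorted _ _ _ _).mpr hc)]
    simp [hperm.countP_eq]
  have hassoc : key.toList.foldl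
      (fun acc s => acc ++ PySem.Int.toChars
        (((PySem.List.index? (PySem.List.sorted key.toList (fun x => x) false) s).getD 0 : Nat) : Int) ++ [',']) []
      = key.toList.flatMap (fun s => PySem.Int.toChars
        (((PySem.List.index? (PySem.List.sorted key.toList (fun x => x) false) s).getD 0 : Nat) : Int) ++ [',']) := by
    exact (PySem.List.foldl_congr_mem _ _ _ _ (fun acc x _ => List.append_assoc _ _ _)).trans
      (by simpa using PySem.List.foldl_append_eq_flatMap _ key.toList [])
  rw [hassoc, PySem.List.slice_to_neg_one]
  have hflat : key.toList.flatMap (fun s => PySem.Int.toChars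
        (((PySem.List.index? (PySem.List.sorted key.toList (fun x => x) false) s).getD 0 : Nat) : Int) ++ [','])
      = (key.toList.map (fun s => PySem.Int.toChars
        (((PySem.List.index? (PySem.List.sorted key.toList (fun x => x) false) s).getD 0 : Nat) : Int))).flatMap
        (fun t => t ++ [',']) := by
    rw [List.flatMap_map]
  rw [hflat, splitOn_eq_splitC, splitC_joined _ (by simpa using h)
    (by intro t ht; rcases List.mem_map.mp ht with ⟨c, _, rfl⟩; exact comma_not_mem_toChars _)]
  rw [List.map_map]
  apply List.map_congr_left
  intro c hc
  simp only [Function.comp_apply]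
  rw [pyIntDigits_toChars]
  rw [hidx c hc]
  rfl

-- B's per-character fold is the same count
theorem foldl_count_lt (c : Char) (l : List Char) :
    ∀ a : Int, l.foldl (fun a d => if d < c then a + 1 else a) a
      = a + ((l.countP (fun d => decide (d < c)) : Nat) : Int) := by
  induction l with
  | nil => intro a; simp
  | cons x l ih =>
    intro a
    rw [List.foldl_cons, ih, List.countP_cons]
    by_cases hx : x < c
    · simp [hx]; ring
    · simp [hx]

theorem getNumKey_alt_eq_countP (key : String) :
    getNumKey_alt key
      = key.toList.map (fun c => ((key.toList.countP (fun d => decide (d < c)) : Nat) : Int)) := by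
  simp only [getNumKey_alt]
  apply List.map_congr_left
  intro c _
  rw [foldl_count_lt c key.toList 0, zero_add]

-- ===== VERDICT (by name: the statement is the Claim_ definition above) =====
theorem getNumKey_spec : Claim_equal_getNumKey := by
  intro key _ hpre
  unfold Spec_getNumKey
  have h : key.toList ≠ [] := by
    intro hnil
    exact hpre (String.toList_eq_nil_iff.mp hnil)
  rw [getNumKey_eq_countP key h, getNumKey_alt_eq_countP key]
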